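-- pv_equiv track=rewrite | github.com/Shubham37204/DSA | Pattern/ReserveTriangle.py | reverseTriangle
-- ===== SOURCE A (Python) =====
-- def reverseTriangle(n):
--     result = []
--
--     for i in range(1, n + 1):
--         row = ""
--         for j in range(i, 0, -1):
--             row += str(j)
--         result.append(row)
--
--     return result
-- ===== SOURCE B (Python) =====
-- def reverseTriangle(n):
--     full = "".join(str(j) for j in range(n, 0, -1))
--     result = []
--     cut = len(full)
--     for i in range(1, n + 1):
--         cut -= len(str(i))
--         result.append(full[cut:])
--     return result
-- ===== Notes on version B (the rewrite author's own statement) =====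
-- stated objective: faster
-- what changed: Replaces the nested loop that rebuilds every row digit by digit with one join building the full descending string n..1 once, after which each row is taken as a suffix slice at a maintained cut offset.
import Mathlib
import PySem

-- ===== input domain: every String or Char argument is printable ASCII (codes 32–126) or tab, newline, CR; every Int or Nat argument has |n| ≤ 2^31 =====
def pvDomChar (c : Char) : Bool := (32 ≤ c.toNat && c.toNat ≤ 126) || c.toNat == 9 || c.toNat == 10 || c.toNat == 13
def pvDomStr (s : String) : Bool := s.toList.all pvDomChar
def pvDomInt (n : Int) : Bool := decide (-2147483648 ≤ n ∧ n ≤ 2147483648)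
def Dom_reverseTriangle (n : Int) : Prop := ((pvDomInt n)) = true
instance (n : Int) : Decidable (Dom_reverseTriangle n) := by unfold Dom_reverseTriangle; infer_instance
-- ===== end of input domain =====

-- B builds the full descending string n..1 once and cuts each row out of it as a suffix slice,
-- replacing A's inner digit-by-digit loop per row.

-- ===== PORT A =====
def reverseTriangle (n : Int) : List String :=
  (PySem.List.pyRange 1 (n + 1) 1).foldl
    (fun result i =>
      result ++ [(PySem.List.pyRange i 0 (-1)).foldl (fun row j => row ++ PySem.Int.toStr j) ""])
    []

-- ===== PORT B =====
def reverseTriangle_alt (n : Int) : List String :=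
  let full : String := PySem.Str.join "" ((PySem.List.pyRange n 0 (-1)).map (fun j => PySem.Int.toStr j))
  ((PySem.List.pyRange 1 (n + 1) 1).foldl
    (fun (st : Int × List String) i =>
      let cut := st.1 - PySem.Str.len (PySem.Int.toStr i)
      (cut, st.2 ++ [PySem.Str.slice full (some cut) none]))
    (PySem.Str.len full, [])).2

-- ===== PRECONDITION & SPEC =====
def Spec_reverseTriangle (n : Int) (out : List String) : Prop := out = reverseTriangle_alt n
instance (n : Int) (out : List String) : Decidable (Spec_reverseTriangle n out) := by unfold Spec_reverseTriangle; infer_instance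

-- ===== CLAIM (what is proved, stated in full; the proofs are below) =====
def Claim_equal_reverseTriangle : Prop := ∀ (n : Int), Dom_reverseTriangle n → Spec_reverseTriangle n (reverseTriangle n)

-- ===== LEMMAS AND PROOFS =====

-- The char content of the countdown n..1 (row n / the full string), as a flat char list.
def pvFlat (m : Int) : List Char :=
  ((PySem.List.pyRange m 0 (-1)).map (fun j => PySem.Int.toChars j)).flatten

-- A's inner row loop, at the char level.
theorem rowA_toList (l : List Int) (s : String) :
    (l.foldl (fun row j => row ++ PySem.Int.toStr j) s).toList
      = s.toList ++ (l.map (fun j => PySem.Int.toChars j)).flatten := by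
  induction l generalizing s with
  | nil => simp
  | cons x xs ih => simp [ih, PySem.Int.toList_toStr]

-- ''.join of char lists is their flattening.
theorem join_empty_flatten (css : List (List Char)) :
    PySem.Chars.join [] css = css.flatten := by
  induction css with
  | nil => simp [PySem.Chars.join, List.intercalate]
  | cons c cs ih =>
    cases cs with
    | nil => simp [PySem.Chars.join, List.intercalate]
    | cons d ds =>
      rw [PySem.Chars.join_cons_cons, ih]
      simp

theorem full_toList (n : Int) :
    (PySem.Str.join "" ((PySem.List.pyRange n 0 (-1)).map (fun j => PySem.Int.toStr j))).toList
      = pvFlat n := by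
  simp [PySem.Str.toList_join, pvFlat, join_empty_flatten, List.map_map, Function.comp_def,
    PySem.Int.toList_toStr]

theorem full_len (n : Int) :
    PySem.Str.len (PySem.Str.join "" ((PySem.List.pyRange n 0 (-1)).map (fun j => PySem.Int.toStr j)))
      = ((pvFlat n).length : Int) := by
  rw [PySem.Str.len_eq, full_toList]

-- pvFlat grows on the left by the digits of the new top number.
theorem pvFlat_succ (m : Int) (hm : 0 < m) :
    pvFlat m = PySem.Int.toChars m ++ pvFlat (m - 1) := by
  unfold pvFlat
  rw [PySem.List.pyRange_neg_one_cons hm]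
  simp

-- pvFlat m is a suffix of pvFlat n for 0 ≤ m ≤ n, recoverable by dropping the length difference.
theorem pvFlat_suffix (n m : Int) (h0 : 0 ≤ m) (hm : m ≤ n) :
    ∃ p, pvFlat n = p ++ pvFlat m := by
  have key : ∀ k : Nat, ∀ n : Int, n = m + k → ∃ p, pvFlat n = p ++ pvFlat m := by
    intro k
    induction k with
    | zero => intro n hn; exact ⟨[], by simp [hn]⟩
    | succ j ih =>
      intro n hn
      obtain ⟨p, hp⟩ := ih (n - 1) (by omega)
      refine ⟨PySem.Int.toChars n ++ p, ?_⟩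
      rw [pvFlat_succ n (by omega), hp]
      simp
  obtain ⟨k, hk⟩ : ∃ k : Nat, n = m + k := ⟨(n - m).toNat, by omega⟩
  exact key k n hk

theorem drop_suffix (full suf : List Char) (p : List Char) (h : full = p ++ suf) :
    full.drop (full.length - suf.length) = suf := by
  subst h
  simp

-- The invariant of B's single pass: after i = 1..m the cut sits len (pvFlat m) before the end
-- and the collected rows are exactly A's rows.
theorem pass_invariant (n : Int) (m : Nat) (hm : (m : Int) ≤ n) :
    ((PySem.List.pyRange 1 ((m : Int) + 1) 1).foldl
      (fun (st : Int × List String) i =>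
        let cut := st.1 - PySem.Str.len (PySem.Int.toStr i)
        (cut, st.2 ++ [PySem.Str.slice (PySem.Str.join "" ((PySem.List.pyRange n 0 (-1)).map (fun j => PySem.Int.toStr j))) (some cut) none]))
      (PySem.Str.len (PySem.Str.join "" ((PySem.List.pyRange n 0 (-1)).map (fun j => PySem.Int.toStr j))), []))
    = (((pvFlat n).length : Int) - ((pvFlat m).length : Int),
       (PySem.List.pyRange 1 ((m : Int) + 1) 1).foldl
         (fun result i =>
           result ++ [(PySem.List.pyRange i 0 (-1)).foldl (fun row j => row ++ PySem.Int.toStr j) ""])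
         []) := by
  induction m with
  | zero =>
    rw [PySem.List.pyRange_one_eq_nil (by omega)]
    simp only [List.foldl_nil]
    rw [full_len]
    simp [pvFlat, PySem.List.pyRange_neg_one_eq_nil le_rfl]
  | succ k ihk =>
    have hk : (k : Int) ≤ n := by push_cast at hm ⊢; omega
    have hsplit : PySem.List.pyRange 1 ((k : Int) + 1 + 1) 1
        = PySem.List.pyRange 1 ((k : Int) + 1) 1 ++ [(k : Int) + 1] :=
      PySem.List.pyRange_one_succ_right (by omega)
    push_cast
    rw [hsplit, List.foldl_append, List.foldl_append, ihk hk]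
    simp only [List.foldl_cons, List.foldl_nil]
    -- the new cut equals len full - len (pvFlat (k+1))
    have hlen : PySem.Str.len (PySem.Int.toStr ((k : Int) + 1))
        = ((PySem.Int.toChars ((k : Int) + 1)).length : Int) := by
      simp [PySem.Str.len_eq, PySem.Int.toList_toStr]
    have hflat : pvFlat ((k : Int) + 1) = PySem.Int.toChars ((k : Int) + 1) ++ pvFlat (k : Int) := by
      have := pvFlat_succ ((k : Int) + 1) (by omega)
      simpa using this
    have hcut : (((pvFlat n).length : Int) - ((pvFlat (k : Int)).length : Int))
          - PySem.Str.len (PySem.Int.toStr ((k : Int) + 1))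
        = ((pvFlat n).length : Int) - ((pvFlat ((k : Int) + 1)).length : Int) := by
      rw [hlen, hflat]; push_cast [List.length_append]; ring
    -- the new slice is A's row for k+1
    obtain ⟨p, hp⟩ := pvFlat_suffix n ((k : Int) + 1) (by omega) (by push_cast at hm ⊢; omega)
    have hsuffLen : ((pvFlat ((k : Int) + 1)).length : Int) ≤ ((pvFlat n).length : Int) := by
      rw [hp]; push_cast [List.length_append]; omega
    have hslice : PySem.Str.slice
          (PySem.Str.join "" ((PySem.List.pyRange n 0 (-1)).map (fun j => PySem.Int.toStr j)))
          (some (((pvFlat n).length : Int) - ((pvFlat ((k : Int) + 1)).length : Int))) none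
        = (PySem.List.pyRange ((k : Int) + 1) 0 (-1)).foldl (fun row j => row ++ PySem.Int.toStr j) "" := by
      apply String.ext
      rw [PySem.Str.toList_slice, full_toList]
      simp only [PySem.Chars.slice]
      rw [PySem.List.slice_from _ (by omega), rowA_toList]
      have htn : ((((pvFlat n).length : Int) - ((pvFlat ((k : Int) + 1)).length : Int))).toNat
          = (pvFlat n).length - (pvFlat ((k : Int) + 1)).length := by omega
      rw [htn, drop_suffix (pvFlat n) (pvFlat ((k : Int) + 1)) p hp]
      simp [pvFlat]
    rw [Prod.mk.injEq]
    constructor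
    · simpa using hcut
    · rw [List.append_cancel_left_eq]
      simp only [List.cons.injEq, and_true]
      rw [← hslice]
      congr 1
      simpa using hcut

-- ===== VERDICT (by name: the statement is the Claim_ definition above) =====
theorem reverseTriangle_spec : Claim_equal_reverseTriangle := by
  intro n _
  unfold Spec_reverseTriangle reverseTriangle reverseTriangle_alt
  by_cases hn : 0 ≤ n
  · obtain ⟨m, rfl⟩ : ∃ m : Nat, n = (m : Int) := ⟨n.toNat, (Int.toNat_of_nonneg hn).symm⟩
    simp only []
    rw [pass_invariant (m : Int) m le_rfl]
  · rw [PySem.List.pyRange_one_eq_nil (by omega)]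
    simp
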